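-- pv_equiv track=rewrite | github.com/pypi-data/pypi-mirror-353 | packages/cuery/cuery-0.1.0.tar.gz/cuery-0.1.0/src/cuery/topics/oneshot.py | parse_markdown_topics
-- ===== SOURCE A (Python) =====
-- def parse_markdown_topics(markdown: str) -> dict:
--     """Converts a two-level nested markdown list of topics into a dictionary."""
--     lines = markdown.strip().split("\n")
--     topics = {}
--     current_topic = None
--
--     for line in lines:
--         if not line.strip():
--             continue
--
--         if line.startswith("- "):
--             current_topic = line[2:].strip()
--             topics[current_topic] = []
--         elif line.startswith("  - "):
--             if current_topic is not None:
--                 subtopic = line[4:].strip()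
--                 topics[current_topic].append(subtopic)
--
--     return topics
-- ===== SOURCE B (Python) =====
-- def _split_block(lines):
--     """Split lines into (lines before the first top-level header, the rest)."""
--     for i, line in enumerate(lines):
--         if line.startswith("- "):
--             return lines[:i], lines[i:]
--     return lines, []
--
--
-- def parse_markdown_topics(markdown: str) -> dict:
--     """Converts a two-level nested markdown list of topics into a dictionary."""
--     lines = markdown.strip().split("\n")
--     _, lines = _split_block(lines)  # drop anything before the first header
--     topics = {}
--     while lines:
--         header, rest = lines[0], lines[1:]
--         block, lines = _split_block(rest)
--         topics[header[2:].strip()] = [l[4:].strip() for l in block if l.startswith("  - ")]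
--     return topics
-- ===== Notes on version B (the rewrite author's own statement) =====
-- stated objective: alternative
-- what changed: Replaces A's single-pass state machine (current_topic holding the open header, appending subtopics one by one) with a segment decomposition: split the lines at each top-level header and build every topic's full subtopic list in one comprehension over its block.
import Mathlib
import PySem

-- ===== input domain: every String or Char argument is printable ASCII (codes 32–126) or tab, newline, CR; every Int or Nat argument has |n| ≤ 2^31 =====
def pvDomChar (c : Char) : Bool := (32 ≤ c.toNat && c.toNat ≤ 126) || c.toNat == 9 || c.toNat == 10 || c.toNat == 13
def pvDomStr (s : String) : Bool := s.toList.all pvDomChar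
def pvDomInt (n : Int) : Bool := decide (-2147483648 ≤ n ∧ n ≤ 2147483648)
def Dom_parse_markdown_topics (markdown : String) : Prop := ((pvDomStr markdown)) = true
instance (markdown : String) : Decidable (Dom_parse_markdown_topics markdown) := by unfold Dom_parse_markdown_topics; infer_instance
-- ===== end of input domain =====

-- B replaces A's one-pass current_topic state machine by a split-at-headers
-- segment decomposition (objective: alternative, same O(n) cost).

-- ===== PORT A =====
-- one iteration of A's for-loop; the state is (topics, current_topic).
-- topics[current_topic].append(s) is ported as Dict.modify; whenever current_topic
-- is some t, t is a key of topics (A set topics[t] = [] at the header), so the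
-- default value of modify is never consulted.
def pvAStep (st : PySem.Dict String (List String) × Option String) (line : String) :
    PySem.Dict String (List String) × Option String :=
  if PySem.Str.strip line = "" then st
  else if PySem.Str.startswith line "- " then
    let t := PySem.Str.strip (PySem.Str.slice line (some 2) none)
    (st.1.insert t [], some t)
  else if PySem.Str.startswith line "  - " then
    match st.2 with
    | some cur =>
        (st.1.modify cur [] (· ++ [PySem.Str.strip (PySem.Str.slice line (some 4) none)]), st.2)
    | none => st
  else st

def parse_markdown_topics (markdown : String) : List (String × List String) :=
  let lines := (PySem.Str.split? (PySem.Str.strip markdown) "\n").getD []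
  (lines.foldl pvAStep (PySem.Dict.empty, none)).1.items

-- ===== PORT B =====
def pvIsHeader (l : String) : Bool := PySem.Str.startswith l "- "

-- Source B's _split_block: (lines before the first top-level header, the rest)
def pvSplitBlock (lines : List String) : List String × List String :=
  (lines.takeWhile (fun l => !pvIsHeader l), lines.dropWhile (fun l => !pvIsHeader l))

-- the subtopic comprehension of Source B
def pvBlockSubs (block : List String) : List String :=
  (block.filter (fun l => PySem.Str.startswith l "  - ")).map
    (fun l => PySem.Str.strip (PySem.Str.slice l (some 4) none))

-- Source B's while-loop: lines starts at a header (or is empty)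
def pvBLoop (lines : List String) (topics : PySem.Dict String (List String)) :
    PySem.Dict String (List String) :=
  match lines with
  | [] => topics
  | header :: rest =>
    let p := pvSplitBlock rest
    pvBLoop p.2 (topics.insert (PySem.Str.strip (PySem.Str.slice header (some 2) none))
      (pvBlockSubs p.1))
  termination_by lines.length
  decreasing_by
    simp only [pvSplitBlock, List.length_cons]
    exact Nat.lt_succ_of_le (List.length_dropWhile_le _ _)

def parse_markdown_topics_alt (markdown : String) : List (String × List String) :=
  let lines := (PySem.Str.split? (PySem.Str.strip markdown) "\n").getD []
  (pvBLoop (pvSplitBlock lines).2 PySem.Dict.empty).items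

-- ===== PRECONDITION & SPEC =====
def Spec_parse_markdown_topics (markdown : String) (out : List (String × List String)) : Prop := out = parse_markdown_topics_alt markdown
instance (markdown : String) (out : List (String × List String)) : Decidable (Spec_parse_markdown_topics markdown out) := by unfold Spec_parse_markdown_topics; infer_instance

-- ===== CLAIM (what is proved, stated in full; the proofs are below) =====
def Claim_equal_parse_markdown_topics : Prop := ∀ (markdown : String), Dom_parse_markdown_topics markdown → Spec_parse_markdown_topics markdown (parse_markdown_topics markdown)

-- ===== LEMMAS AND PROOFS =====

-- a line starting with a prefix that contains '-' is not blank after strip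
theorem pv_strip_ne_of_startswith (l p : String) (hp : '-' ∈ p.toList)
    (h : PySem.Str.startswith l p = true) : PySem.Str.strip l ≠ "" := by
  intro hs
  have hpre : p.toList <+: l.toList :=
    (PySem.Chars.startswith_iff _ _).mp (by rw [← PySem.Str.startswith_eq]; exact h)
  have hmem : '-' ∈ l.toList := hpre.subset hp
  have hnil : PySem.Chars.strip l.toList = [] := by
    have := PySem.Str.toList_strip l
    rw [hs] at this
    simpa using this.symm
  simp only [PySem.Chars.strip, PySem.Chars.rstrip, PySem.Chars.lstrip,
    List.reverse_eq_nil_iff, List.dropWhile_eq_nil_iff, List.mem_reverse] at hnil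
  rw [← List.takeWhile_append_dropWhile (p := PySem.Chars.isspace) (l := l.toList)]
    at hmem
  have hsp : PySem.Chars.isspace '-' = true := by
    rcases List.mem_append.mp hmem with hx | hx
    · exact List.mem_takeWhile_imp hx
    · exact hnil _ hx
  simp [PySem.Chars.isspace] at hsp

theorem pv_block_fold (block : List String)
    (hb : ∀ l ∈ block, pvIsHeader l = false) (d : PySem.Dict String (List String))
    (t : String) (v : List String) :
    block.foldl pvAStep (d.insert t v, some t) =
      (d.insert t (v ++ pvBlockSubs block), some t) := by
  induction block generalizing v with
  | nil => simp [pvBlockSubs]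
  | cons l ls ih =>
    have hbl : ¬ (PySem.Str.startswith l "- " = true) := by
      have := hb l (List.mem_cons_self ..)
      simp [pvIsHeader] at this
      simp [this]
    have hbs : ∀ x ∈ ls, pvIsHeader x = false := fun x hx => hb x (List.mem_cons_of_mem _ hx)
    rw [List.foldl_cons]
    by_cases hblank : PySem.Str.strip l = ""
    · have hsub : ¬ (PySem.Str.startswith l "  - " = true) := by
        intro hc
        exact pv_strip_ne_of_startswith l "  - " (by decide) hc hblank
      have hstep : pvAStep (d.insert t v, some t) l = (d.insert t v, some t) := by
        unfold pvAStep
        rw [if_pos hblank]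
      rw [hstep, ih hbs v]
      unfold pvBlockSubs
      rw [List.filter_cons, if_neg hsub]
    · by_cases hsub : PySem.Str.startswith l "  - " = true
      · have hstep : pvAStep (d.insert t v, some t) l =
            (d.insert t (v ++ [PySem.Str.strip (PySem.Str.slice l (some 4) none)]), some t) := by
          unfold pvAStep
          rw [if_neg hblank, if_neg hbl, if_pos hsub]
          simp only [PySem.Dict.modify, PySem.Dict.getD_insert_self,
            PySem.Dict.insert_insert_self]
        rw [hstep, ih hbs]
        unfold pvBlockSubs
        rw [List.filter_cons, if_pos hsub]
        simp [List.append_assoc]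
      · have hstep : pvAStep (d.insert t v, some t) l = (d.insert t v, some t) := by
          unfold pvAStep
          rw [if_neg hblank, if_neg hbl, if_neg hsub]
        rw [hstep, ih hbs v]
        unfold pvBlockSubs
        rw [List.filter_cons, if_neg hsub]

theorem pv_pre_fold (pre : List String)
    (hb : ∀ l ∈ pre, pvIsHeader l = false) (d : PySem.Dict String (List String)) :
    pre.foldl pvAStep (d, none) = (d, none) := by
  induction pre with
  | nil => rfl
  | cons l ls ih =>
    have hbl : ¬ (PySem.Str.startswith l "- " = true) := by
      have := hb l (List.mem_cons_self ..)
      simp [pvIsHeader] at this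
      simp [this]
    have hstep : pvAStep (d, none) l = (d, none) := by
      unfold pvAStep
      by_cases hblank : PySem.Str.strip l = ""
      · rw [if_pos hblank]
      · rw [if_neg hblank, if_neg hbl]
        by_cases hsub : PySem.Str.startswith l "  - " = true
        · rw [if_pos hsub]
        · rw [if_neg hsub]
    rw [List.foldl_cons, hstep, ih (fun x hx => hb x (List.mem_cons_of_mem _ hx))]

theorem pv_run (n : Nat) : ∀ (lines : List String), lines.length ≤ n →
    (lines = [] ∨ ∃ h rest, lines = h :: rest ∧ pvIsHeader h = true) →
    ∀ (c : Option String) (d : PySem.Dict String (List String)),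
    (lines.foldl pvAStep (d, c)).1 = pvBLoop lines d := by
  induction n with
  | zero =>
    intro lines hlen _ c d
    have : lines = [] := List.length_eq_zero_iff.mp (Nat.le_zero.mp hlen)
    subst this
    rw [pvBLoop]
    rfl
  | succ m ih =>
    intro lines hlen hbd c d
    rcases hbd with rfl | ⟨h, rest, rfl, hh⟩
    · rw [pvBLoop]
      rfl
    · have hblank : PySem.Str.strip h ≠ "" :=
        pv_strip_ne_of_startswith h "- " (by decide) (by simpa [pvIsHeader] using hh)
      have hstep : pvAStep (d, c) h =
          (d.insert (PySem.Str.strip (PySem.Str.slice h (some 2) none)) [],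
           some (PySem.Str.strip (PySem.Str.slice h (some 2) none))) := by
        unfold pvAStep
        rw [if_neg hblank, if_pos (by simpa [pvIsHeader] using hh)]
      have hsplit : rest = rest.takeWhile (fun l => !pvIsHeader l) ++
          rest.dropWhile (fun l => !pvIsHeader l) :=
        (List.takeWhile_append_dropWhile ..).symm
      have htw : ∀ l ∈ rest.takeWhile (fun l => !pvIsHeader l), pvIsHeader l = false := by
        intro l hl
        simpa using List.mem_takeWhile_imp hl
      have hbd' : rest.dropWhile (fun l => !pvIsHeader l) = [] ∨
          ∃ h' rest', rest.dropWhile (fun l => !pvIsHeader l) = h' :: rest' ∧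
            pvIsHeader h' = true := by
        cases hd : rest.dropWhile (fun l => !pvIsHeader l) with
        | nil => exact Or.inl rfl
        | cons h' t' =>
          refine Or.inr ⟨h', t', rfl, ?_⟩
          have h1 : rest.dropWhile (fun l => !pvIsHeader l) ≠ [] := by simp [hd]
          have := List.head_dropWhile_not (fun l => !pvIsHeader l) h1
          simpa [hd] using this
      have hlen' : (rest.dropWhile (fun l => !pvIsHeader l)).length ≤ m := by
        have h1 := List.length_dropWhile_le (fun l => !pvIsHeader l) rest
        simp only [List.length_cons] at hlen
        omega
      rw [List.foldl_cons, hstep]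
      conv_lhs => rw [hsplit, List.foldl_append]
      rw [pv_block_fold _ htw d _ []]
      simp only [List.nil_append]
      rw [ih _ hlen' hbd']
      rw [pvBLoop]
      simp only [pvSplitBlock]

-- ===== VERDICT (by name: the statement is the Claim_ definition above) =====
theorem parse_markdown_topics_spec : Claim_equal_parse_markdown_topics := by
  intro markdown _
  unfold Spec_parse_markdown_topics parse_markdown_topics parse_markdown_topics_alt
  simp only [pvSplitBlock]
  set lines := (PySem.Str.split? (PySem.Str.strip markdown) "\n").getD []
  have hsplit : lines = lines.takeWhile (fun l => !pvIsHeader l) ++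
      lines.dropWhile (fun l => !pvIsHeader l) :=
    (List.takeWhile_append_dropWhile ..).symm
  have htw : ∀ l ∈ lines.takeWhile (fun l => !pvIsHeader l), pvIsHeader l = false := by
    intro l hl
    simpa using List.mem_takeWhile_imp hl
  have hbd : lines.dropWhile (fun l => !pvIsHeader l) = [] ∨
      ∃ h' rest', lines.dropWhile (fun l => !pvIsHeader l) = h' :: rest' ∧
        pvIsHeader h' = true := by
    cases hd : lines.dropWhile (fun l => !pvIsHeader l) with
    | nil => exact Or.inl rfl
    | cons h' t' =>
      refine Or.inr ⟨h', t', rfl, ?_⟩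
      have h1 : lines.dropWhile (fun l => !pvIsHeader l) ≠ [] := by simp [hd]
      have := List.head_dropWhile_not (fun l => !pvIsHeader l) h1
      simpa [hd] using this
  conv_lhs => rw [hsplit, List.foldl_append]
  rw [pv_pre_fold _ htw]
  rw [pv_run (lines.dropWhile (fun l => !pvIsHeader l)).length _ le_rfl hbd]
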